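-- pv_equiv track=rewrite | github.com/markalexander/gsa-ultra-2018 | crossword/down/q6d/solution.py | can_nodes_be_kahn_active_set
-- ===== SOURCE A (Python) =====
-- from collections import defaultdict
-- from itertools import product
--
-- def can_nodes_be_kahn_active_set(n, edges, nodes) -> bool:
--     """Determine whether the given set of nodes could ever be the active/open
--     node set of the Khan topological ordering algo for the given graph.
--
--     Args:
--         n:     The number of nodes in the graph.
--         edges: The directed edges of the DAG.
--         nodes: The 'target' nodes.
--
--     Returns:
--         Whether or not this is the case.
--
--     """
--     # Convert graph to a more amenable form for path-finding
--     g = defaultdict(list)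
--     for u, v in edges:
--         g[u].append(v)
--
--     # For each pair of target nodes
--     for u, v in filter(lambda x: x[0] > x[1], product(nodes, repeat=2)):
--         # Two nodes can be the active set together iff there is no directed
--         # path between them
--         if get_path_between_nodes(g, u, v) or get_path_between_nodes(g, v, u):
--             return False
--
--     # Now, we know the active set could at some point contain all the target
--     # nodes.  The question becomes could it contain *only* those nodes.
--     # However, any open node can be removed at random, and this will only be
--     # replaced with another if a node it was connected to now has an in_deg of
--     # 0.  But then this new node becomes another open node that can be also be
--     # randomly removed, and so it is always possible (even if unlikely) that all
--     # are eventually removed *but* the target nodes.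
--     return True
--
-- def get_path_between_nodes(graph, start, end, path=None):
--     """Find *any* path between two given nodes of the graph.
--
--     Args:
--         graph: The graph, in dict form.
--         start: Start node.
--         end:   End node.
--         path:  Current path for recursive calling.
--
--     Returns:
--         The path between the nodes, or None if none exists.
--
--     """
--     if path is None:
--         path = []
--     path = path + [start]
--     if start == end:
--         return path
--     if start not in graph:
--         return None
--     for node in graph[start]:
--         if node not in path:
--             new_path = get_path_between_nodes(graph, node, end, path)
--             if new_path:
--                 return new_path
--     return None
-- ===== SOURCE B (Python) =====
-- def can_nodes_be_kahn_active_set(n, edges, nodes) -> bool: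
--     # Distinct target nodes, in first-occurrence order.
--     targets = []
--     for x in nodes:
--         if x not in targets:
--             targets.append(x)
--     # For each target, compute the set of nodes reachable from it by
--     # iterated edge relaxation (at most len(edges) rounds are needed to
--     # reach the fixpoint), then check no other target is reachable.
--     for u in targets:
--         seen = {u}
--         for _ in range(len(edges)):
--             changed = False
--             for a, b in edges:
--                 if a in seen and b not in seen:
--                     seen.add(b)
--                     changed = True
--             if not changed:
--                 break
--         for v in targets:
--             if v != u and v in seen:
--                 return False
--     return True
-- ===== Notes on version B (the rewrite author's own statement) =====
-- stated objective: alternative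
-- what changed: Replaced A's per-pair recursive simple-path DFS (backtracking over all simple paths, run in both directions for every target pair) by one reachable-set computation per distinct target via iterated edge relaxation to a fixpoint, followed by a membership check over target pairs.
import Mathlib
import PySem

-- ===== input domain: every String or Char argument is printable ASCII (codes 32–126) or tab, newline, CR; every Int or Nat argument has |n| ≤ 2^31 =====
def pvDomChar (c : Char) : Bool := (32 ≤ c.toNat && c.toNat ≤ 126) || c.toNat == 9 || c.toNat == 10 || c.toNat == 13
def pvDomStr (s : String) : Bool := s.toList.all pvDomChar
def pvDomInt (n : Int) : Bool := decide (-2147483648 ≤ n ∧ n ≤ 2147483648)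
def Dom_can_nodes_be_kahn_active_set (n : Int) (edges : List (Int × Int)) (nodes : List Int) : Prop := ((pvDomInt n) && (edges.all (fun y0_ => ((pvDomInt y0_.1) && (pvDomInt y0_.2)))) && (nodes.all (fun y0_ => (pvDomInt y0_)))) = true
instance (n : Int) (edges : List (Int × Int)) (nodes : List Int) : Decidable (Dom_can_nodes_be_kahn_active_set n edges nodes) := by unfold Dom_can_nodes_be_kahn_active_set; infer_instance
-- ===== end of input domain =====

-- B replaces A's per-pair recursive simple-path DFS by one reachable-set computation per
-- distinct target (iterated edge relaxation to a fixpoint) followed by a pair membership check.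

-- ===== PORT A =====
-- g = defaultdict(list); for u, v in edges: g[u].append(v)
def pvBuildGraph (edges : List (Int × Int)) : PySem.Dict Int (List Int) :=
  edges.foldl (fun d p => d.modify p.1 [] (fun l => l ++ [p.2])) PySem.Dict.empty

-- Python truthiness of get_path_between_nodes' result (None or a list).
def pvTruthy (o : Option (List Int)) : Bool :=
  match o with
  | none => false
  | some p => !p.isEmpty

-- get_path_between_nodes, recursion made structural on a fuel argument;
-- fuel = edges.length + 1 always suffices (pvGetPath_complete below), so the 0 branch
-- is a totality guard only.  The for-loop over graph[start] with its early return is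
-- the foldl that keeps the first truthy result.
def pvGetPath (g : PySem.Dict Int (List Int)) : Nat → Int → Int → List Int → Option (List Int)
  | 0, _, _, _ => none
  | fuel+1, start, stop, path =>
    let path2 := path ++ [start]
    if start = stop then some path2
    else if g.contains start then
      (g.getD start []).foldl
        (fun acc node =>
          match acc with
          | some p => some p
          | none =>
            if node ∈ path2 then none
            else
              match pvGetPath g fuel node stop path2 with
              | some p => if p.isEmpty then none else some p
              | none => none)
        none
    else none

-- for u, v in filter(lambda x: x[0] > x[1], product(nodes, repeat=2)): early return False
def can_nodes_be_kahn_active_set (n : Int) (edges : List (Int × Int)) (nodes : List Int) : Bool :=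
  let g := pvBuildGraph edges
  !(nodes.any fun u => nodes.any fun v =>
      decide (u > v) &&
        (pvTruthy (pvGetPath g (edges.length + 1) u v []) ||
         pvTruthy (pvGetPath g (edges.length + 1) v u [])))

-- ===== PORT B =====
-- one inner relaxation round over the edges: returns (new seen, changed)
def pvRelaxRound (edges : List (Int × Int)) (S : PySem.Set Int) : PySem.Set Int × Bool :=
  edges.foldl
    (fun acc p =>
      if acc.1.contains p.1 && !acc.1.contains p.2 then (PySem.Set.add acc.1 p.2, true) else acc)
    (S, false)

-- for _ in range(len(edges)): ... if not changed: break
def pvIterClose (edges : List (Int × Int)) : Nat → PySem.Set Int → PySem.Set Int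
  | 0, S => S
  | fuel+1, S =>
    let r := pvRelaxRound edges S
    if r.2 then pvIterClose edges fuel r.1 else r.1

def can_nodes_be_kahn_active_set_alt (n : Int) (edges : List (Int × Int)) (nodes : List Int) : Bool :=
  let targets : PySem.Set Int := PySem.Set.ofList nodes
  !(targets.any fun u =>
      let seen := pvIterClose edges edges.length (PySem.Set.ofList [u])
      targets.any fun v => !(v == u) && PySem.Set.contains seen v)

-- ===== PRECONDITION & SPEC =====
def Spec_can_nodes_be_kahn_active_set (n : Int) (edges : List (Int × Int)) (nodes : List Int) (out : Bool) : Prop := out = can_nodes_be_kahn_active_set_alt n edges nodes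
instance (n : Int) (edges : List (Int × Int)) (nodes : List Int) (out : Bool) : Decidable (Spec_can_nodes_be_kahn_active_set n edges nodes out) := by unfold Spec_can_nodes_be_kahn_active_set; infer_instance

-- ===== CLAIM (what is proved, stated in full; the proofs are below) =====
def Claim_equal_can_nodes_be_kahn_active_set : Prop := ∀ (n : Int) (edges : List (Int × Int)) (nodes : List Int), Dom_can_nodes_be_kahn_active_set n edges nodes → Spec_can_nodes_be_kahn_active_set n edges nodes (can_nodes_be_kahn_active_set n edges nodes)

-- ===== LEMMAS AND PROOFS =====

-- reachability along the directed edges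
def pvRTG (edges : List (Int × Int)) : Int → Int → Prop :=
  Relation.ReflTransGen (fun a b => (a, b) ∈ edges)

-- what A's DFS explores: reach end from start by a simple path avoiding `P`
inductive pvAReach (edges : List (Int × Int)) : List Int → Int → Int → Prop
  | refl (P : List Int) (e : Int) : pvAReach edges P e e
  | step (P : List Int) (s t e : Int) (ht : (s, t) ∈ edges) (hnp : t ∉ P ++ [s])
      (h : pvAReach edges (P ++ [s]) t e) : pvAReach edges P s e

-- ---- bridge: the built dict is the edge relation ----
lemma pv_adj_mem (edges : List (Int × Int)) (s t : Int) :
    t ∈ (pvBuildGraph edges).getD s [] ↔ (s, t) ∈ edges := by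
  unfold pvBuildGraph
  rw [PySem.Dict.getD_foldl_modify_append]
  simp only [PySem.Dict.getD_empty, List.nil_append, List.mem_map, List.mem_filter, beq_iff_eq]
  constructor
  · rintro ⟨⟨a, b⟩, ⟨hm, rfl⟩, rfl⟩; exact hm
  · intro h; exact ⟨(s, t), ⟨h, rfl⟩, rfl⟩

lemma pv_contains_src (edges : List (Int × Int)) (s t : Int) (h : (s, t) ∈ edges) :
    (pvBuildGraph edges).contains s = true := by
  unfold pvBuildGraph
  rw [PySem.Dict.contains_iff_mem_keys,
    PySem.Dict.keys_foldl_modify_key edges (fun p => p.1) [] (fun _ p l => l ++ [p.2])]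
  rw [PySem.Set.mem_update]
  exact Or.inr (List.mem_map.mpr ⟨(s, t), h, rfl⟩)

-- ---- the early-return foldl over an option ----
lemma pv_foldl_some {β : Type} (f : β → Option (List Int)) (ns : List β) (p : List Int) :
    ns.foldl (fun acc n => match acc with | some q => some q | none => f n) (some p) = some p := by
  induction ns with
  | nil => rfl
  | cons m ms ih => simpa using ih

lemma pv_foldl_eq_some {β : Type} (f : β → Option (List Int)) (ns : List β) (p : List Int)
    (h : ns.foldl (fun acc n => match acc with | some q => some q | none => f n) none = some p) :
    ∃ n ∈ ns, f n = some p := by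
  induction ns with
  | nil => simp at h
  | cons m ms ih =>
    rw [List.foldl_cons] at h
    rcases hm : f m with _ | q
    · rw [hm] at h
      rcases ih h with ⟨n, hn, hfn⟩
      exact ⟨n, List.mem_cons_of_mem _ hn, hfn⟩
    · rw [hm, pv_foldl_some] at h
      exact ⟨m, List.mem_cons_self, by rw [hm, h]⟩

lemma pv_foldl_isSome {β : Type} (f : β → Option (List Int)) (ns : List β) (n : β)
    (hn : n ∈ ns) (h : (f n).isSome) :
    (ns.foldl (fun acc n => match acc with | some q => some q | none => f n) none).isSome := by
  induction ns with
  | nil => simp at hn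
  | cons m ms ih =>
    rw [List.foldl_cons]
    rcases hm : f m with _ | q
    · rcases List.mem_cons.mp hn with rfl | hn'
      · rw [hm] at h; simp at h
      · exact ih hn'
    · rw [pv_foldl_some]; rfl

-- ---- A's DFS never returns some [] ----
lemma pvGetPath_ne_nil (g : PySem.Dict Int (List Int)) :
    ∀ (fuel : Nat) (s e : Int) (P : List Int), pvGetPath g fuel s e P ≠ some [] := by
  intro fuel s e P h
  match fuel with
  | 0 => simp [pvGetPath] at h
  | fuel+1 =>
    rw [pvGetPath] at h
    split_ifs at h with h1 h2
    · simp at h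
    · rcases pv_foldl_eq_some _ _ _ h with ⟨node, _, hf⟩
      by_cases h3 : node ∈ P ++ [s]
      · simp [h3] at hf
      · rw [if_neg h3] at hf
        rcases hq : pvGetPath g fuel node e (P ++ [s]) with _ | q <;>
            (rw [hq] at hf; dsimp only at hf)
        · simp at hf
        · split_ifs at hf with h4 <;> simp_all

lemma pvTruthy_eq_isSome (g : PySem.Dict Int (List Int)) (fuel : Nat) (s e : Int) (P : List Int) :
    pvTruthy (pvGetPath g fuel s e P) = (pvGetPath g fuel s e P).isSome := by
  rcases h : pvGetPath g fuel s e P with _ | p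
  · rfl
  · have hne : p ≠ [] := by
      intro hp; rw [hp] at h; exact pvGetPath_ne_nil g fuel s e P h
    simp [pvTruthy, hne]

-- ---- soundness: a found path witnesses pvAReach ----
lemma pvGetPath_sound (edges : List (Int × Int)) :
    ∀ (fuel : Nat) (s e : Int) (P : List Int),
      (pvGetPath (pvBuildGraph edges) fuel s e P).isSome → pvAReach edges P s e := by
  intro fuel
  induction fuel with
  | zero => intro s e P h; simp [pvGetPath] at h
  | succ fuel ih =>
    intro s e P h
    rw [pvGetPath] at h
    by_cases h1 : s = e
    · subst h1; exact pvAReach.refl P s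
    · rw [if_neg h1] at h
      by_cases h2 : (pvBuildGraph edges).contains s = true
      · rw [if_pos h2] at h
        rcases Option.isSome_iff_exists.mp h with ⟨p, hp⟩
        rcases pv_foldl_eq_some _ _ _ hp with ⟨node, hmem, hf⟩
        by_cases h3 : node ∈ P ++ [s]
        · simp [h3] at hf
        · rw [if_neg h3] at hf
          rcases hq : pvGetPath (pvBuildGraph edges) fuel node e (P ++ [s]) with _ | q <;>
              rw [hq] at hf <;> dsimp only at hf
          · simp at hf
          · have hrec : (pvGetPath (pvBuildGraph edges) fuel node e (P ++ [s])).isSome := by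
              rw [hq]; rfl
            exact pvAReach.step P s node e ((pv_adj_mem edges s node).mp hmem) h3
              (ih node e (P ++ [s]) hrec)
      · rw [if_neg h2] at h; simp at h

-- ---- completeness: with enough fuel the DFS finds a path ----
lemma pvGetPath_complete (edges : List (Int × Int)) {P : List Int} {s e : Int}
    (h : pvAReach edges P s e) :
    ∀ (fuel : Nat),
      (((edges.map Prod.snd).toFinset \ (P ++ [s]).toFinset).card + 1 ≤ fuel) →
      (pvGetPath (pvBuildGraph edges) fuel s e P).isSome := by
  induction h with
  | refl P e =>
    intro fuel hfuel
    match fuel with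
    | 0 => omega
    | f+1 => rw [pvGetPath]; simp
  | step P s t e ht hnp hsub ih =>
    intro fuel hfuel
    match fuel with
    | 0 => omega
    | f+1 =>
      rw [pvGetPath]
      by_cases h1 : s = e
      · rw [if_pos h1]; rfl
      · rw [if_neg h1, if_pos (pv_contains_src edges s t ht)]
        apply pv_foldl_isSome _ _ t ((pv_adj_mem edges s t).mpr ht)
        rw [if_neg hnp]
        have hbound : ((edges.map Prod.snd).toFinset \ ((P ++ [s]) ++ [t]).toFinset).card + 1 ≤ f := by
          have htT : t ∈ (edges.map Prod.snd).toFinset :=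
            List.mem_toFinset.mpr (List.mem_map.mpr ⟨(s, t), ht, rfl⟩)
          have htX : t ∉ (P ++ [s]).toFinset := fun hc => hnp (List.mem_toFinset.mp hc)
          have hins : ((P ++ [s]) ++ [t]).toFinset = insert t (P ++ [s]).toFinset := by
            simp [List.toFinset_append, Finset.insert_comm]
          have hmemd : t ∈ (edges.map Prod.snd).toFinset \ (P ++ [s]).toFinset :=
            Finset.mem_sdiff.mpr ⟨htT, htX⟩
          have hcard : ((edges.map Prod.snd).toFinset \ insert t (P ++ [s]).toFinset).card =
              ((edges.map Prod.snd).toFinset \ (P ++ [s]).toFinset).card - 1 := by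
            rw [Finset.sdiff_insert, Finset.card_erase_of_mem hmemd]
          have hpos : 1 ≤ ((edges.map Prod.snd).toFinset \ (P ++ [s]).toFinset).card :=
            Finset.card_pos.mpr ⟨t, hmemd⟩
          rw [hins, hcard]
          omega
        have hrec := ih f hbound
        rcases Option.isSome_iff_exists.mp hrec with ⟨q, hq⟩
        have hqne : q ≠ [] := by
          intro hnil
          exact pvGetPath_ne_nil (pvBuildGraph edges) f t e (P ++ [s]) (hnil ▸ hq)
        rw [hq]
        dsimp only
        rw [if_neg (by simpa [List.isEmpty_iff] using hqne)]
        rfl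

-- ---- pvAReach vs reachability ----
lemma pvAReach_to_RTG (edges : List (Int × Int)) {P : List Int} {s e : Int}
    (h : pvAReach edges P s e) : pvRTG edges s e := by
  induction h with
  | refl P e => exact Relation.ReflTransGen.refl
  | step P s t e ht hnp hsub ih => exact Relation.ReflTransGen.head ht ih

lemma pv_not_nodup_decomp {α : Type} : ∀ (l : List α), ¬ l.Nodup →
    ∃ (x : α) (l1 l2 l3 : List α), l = l1 ++ x :: l2 ++ x :: l3 := by
  intro l
  induction l with
  | nil => intro h; simp at h
  | cons a l ih =>
    intro h
    by_cases ha : a ∈ l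
    · rcases List.append_of_mem ha with ⟨s, t, rfl⟩
      exact ⟨a, [], s, t, by simp⟩
    · have hnl : ¬ l.Nodup := fun hn => h (List.nodup_cons.mpr ⟨ha, hn⟩)
      rcases ih hnl with ⟨x, l1, l2, l3, rfl⟩
      exact ⟨x, a :: l1, l2, l3, by simp⟩

lemma pv_chain_dedup (r : Int → Int → Prop) :
    ∀ (k : Nat) (l : List Int) (a : Int), l.length ≤ k → List.IsChain r (a :: l) →
      ∃ l', List.IsChain r (a :: l') ∧ (a :: l').getLast? = (a :: l).getLast? ∧
        (a :: l').Nodup := by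
  intro k
  induction k with
  | zero =>
    intro l a hl hc
    have : l = [] := List.length_eq_zero_iff.mp (Nat.le_zero.mp hl)
    subst this
    exact ⟨[], hc, rfl, by simp⟩
  | succ k ih =>
    intro l a hl hc
    by_cases hnd : (a :: l).Nodup
    · exact ⟨l, hc, rfl, hnd⟩
    · rcases pv_not_nodup_decomp _ hnd with ⟨x, L1, L2, L3, hdec⟩
      simp only [List.nil_append, List.cons_append, List.append_assoc] at hdec
      match L1, hdec with
      | [], hdec =>
        injection hdec with h1 h2
        subst h1; subst h2
        have hC : List.IsChain r (a :: L3) :=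
          ((List.isChain_cons_split (l₁ := L2) (l₂ := L3)).mp hc).2
        have hshape : a :: (L2 ++ a :: L3) = (a :: L2) ++ (a :: L3) := by
          rw [List.cons_append]
        have hlast : (a :: (L2 ++ a :: L3)).getLast? = (a :: L3).getLast? := by
          rw [hshape, List.getLast?_append_of_ne_nil _ (List.cons_ne_nil a L3)]
        have hlen : L3.length ≤ k := by
          simp only [List.append_eq, List.length_append, List.length_cons] at hl; omega
        rcases ih L3 a hlen hC with ⟨l', hch', hl', hnd'⟩
        exact ⟨l', hch', hl'.trans hlast.symm, hnd'⟩
      | b :: M, hdec =>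
        injection hdec with h1 h2
        subst h1; subst h2
        have hsplit := (List.isChain_cons_split (l₁ := M) (l₂ := L2 ++ x :: L3)).mp hc
        have hA : List.IsChain r (a :: (M ++ [x])) := hsplit.1
        have hC : List.IsChain r (x :: L3) :=
          ((List.isChain_cons_split (l₁ := L2) (l₂ := L3)).mp hsplit.2).2
        have hnew : List.IsChain r (a :: (M ++ x :: L3)) :=
          (List.isChain_cons_split (l₁ := M) (l₂ := L3)).mpr ⟨hA, hC⟩
        have horig : (a :: (M ++ x :: (L2 ++ x :: L3))).getLast? = (x :: L3).getLast? := by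
          have hshape : a :: (M ++ x :: (L2 ++ x :: L3)) = (a :: M ++ x :: L2) ++ (x :: L3) := by
            simp
          rw [hshape, List.getLast?_append_of_ne_nil _ (List.cons_ne_nil x L3)]
        have hnewlast : (a :: (M ++ x :: L3)).getLast? = (x :: L3).getLast? := by
          have hshape : a :: (M ++ x :: L3) = (a :: M) ++ (x :: L3) := by
            rw [List.cons_append]
          rw [hshape, List.getLast?_append_of_ne_nil _ (List.cons_ne_nil x L3)]
        have hlen : (M ++ x :: L3).length ≤ k := by
          simp only [List.append_eq, List.length_append, List.length_cons] at hl ⊢; omega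
        rcases ih (M ++ x :: L3) a hlen hnew with ⟨l', hch', hl', hnd'⟩
        exact ⟨l', hch', hl'.trans (hnewlast.trans horig.symm), hnd'⟩

lemma pv_chain_to_AReach (edges : List (Int × Int)) :
    ∀ (l : List Int) (a e : Int) (P : List Int),
      List.IsChain (fun x y => (x, y) ∈ edges) (a :: l) → (a :: l).Nodup →
      (∀ x ∈ a :: l, x ∉ P) → (a :: l).getLast? = some e → pvAReach edges P a e := by
  intro l
  induction l with
  | nil =>
    intro a e P _ _ _ hlast
    simp only [List.getLast?_singleton, Option.some_inj] at hlast
    subst hlast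
    exact pvAReach.refl P a
  | cons b l ih =>
    intro a e P hc hnd hP hlast
    have hrel : (a, b) ∈ edges := (List.isChain_cons_cons.mp hc).1
    have hcb : List.IsChain (fun x y => (x, y) ∈ edges) (b :: l) :=
      (List.isChain_cons_cons.mp hc).2
    have hanotin : a ∉ b :: l := (List.nodup_cons.mp hnd).1
    have hndb : (b :: l).Nodup := (List.nodup_cons.mp hnd).2
    have hbP : b ∉ P ++ [a] := by
      intro hmem
      rcases List.mem_append.mp hmem with hmem | hmem
      · exact hP b (by simp) hmem
      · simp only [List.mem_singleton] at hmem
        exact hanotin (hmem ▸ List.mem_cons_self)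
    have hlast' : (b :: l).getLast? = some e := by
      rwa [List.getLast?_cons_cons] at hlast
    refine pvAReach.step P a b e hrel hbP ?_
    apply ih b e (P ++ [a]) hcb hndb ?_ hlast'
    intro x hx hmem
    rcases List.mem_append.mp hmem with hmem | hmem
    · exact hP x (List.mem_cons_of_mem _ hx) hmem
    · simp only [List.mem_singleton] at hmem
      exact hanotin (hmem ▸ hx)

lemma pvRTG_to_getPath (edges : List (Int × Int)) {u v : Int} (h : pvRTG edges u v) :
    (pvGetPath (pvBuildGraph edges) (edges.length + 1) u v []).isSome := by
  rcases List.exists_isChain_cons_of_relationReflTransGen h with ⟨l, hch, hlast⟩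
  have hlast? : (u :: l).getLast? = some v := by
    rw [List.getLast?_eq_getLast_of_ne_nil (List.cons_ne_nil _ _), hlast]
  rcases pv_chain_dedup (fun x y => (x, y) ∈ edges) l.length l u le_rfl hch with
    ⟨l', hch', hlast', hnd'⟩
  have hAR : pvAReach edges [] u v :=
    pv_chain_to_AReach edges l' u v [] hch' hnd' (by simp) (hlast'.trans hlast?)
  apply pvGetPath_complete edges hAR
  have h1 : (((edges.map Prod.snd).toFinset) \ ([] ++ [u]).toFinset).card ≤
      (edges.map Prod.snd).toFinset.card :=
    Finset.card_le_card (Finset.sdiff_subset)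
  have h2 : (edges.map Prod.snd).toFinset.card ≤ edges.length := by
    calc (edges.map Prod.snd).toFinset.card ≤ (edges.map Prod.snd).length :=
          List.toFinset_card_le _
      _ = edges.length := List.length_map ..
  omega

-- A's per-pair test decides reachability
lemma pv_path_iff (edges : List (Int × Int)) (u v : Int) :
    pvTruthy (pvGetPath (pvBuildGraph edges) (edges.length + 1) u v []) = true ↔
      pvRTG edges u v := by
  rw [pvTruthy_eq_isSome]
  constructor
  · intro h
    exact pvAReach_to_RTG edges (pvGetPath_sound edges (edges.length + 1) u v [] h)
  · intro h
    exact pvRTG_to_getPath edges h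

-- ---- B side ----
lemma pvRelax_step_mono (acc : PySem.Set Int × Bool) (p : Int × Int) (x : Int) (hx : x ∈ acc.1) :
    x ∈ (if acc.1.contains p.1 && !acc.1.contains p.2 then (PySem.Set.add acc.1 p.2, true)
      else acc).1 := by
  by_cases hc : (acc.1.contains p.1 && !acc.1.contains p.2) = true
  · rw [if_pos hc]; exact (PySem.Set.mem_add _ _ _).mpr (Or.inl hx)
  · rw [if_neg hc]; exact hx

lemma pvRelax_mono (edges : List (Int × Int)) :
    ∀ (l : List (Int × Int)) (acc : PySem.Set Int × Bool) (x : Int), x ∈ acc.1 →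
      x ∈ (l.foldl (fun acc p =>
        if acc.1.contains p.1 && !acc.1.contains p.2 then (PySem.Set.add acc.1 p.2, true) else acc)
        acc).1 := by
  intro l
  induction l with
  | nil => intro acc x hx; exact hx
  | cons p l ih =>
    intro acc x hx
    rw [List.foldl_cons]
    exact ih _ x (pvRelax_step_mono acc p x hx)

lemma pvRelax_nodup (edges : List (Int × Int)) :
    ∀ (l : List (Int × Int)) (acc : PySem.Set Int × Bool), acc.1.Nodup →
      (l.foldl (fun acc p =>
        if acc.1.contains p.1 && !acc.1.contains p.2 then (PySem.Set.add acc.1 p.2, true) else acc)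
        acc).1.Nodup := by
  intro l
  induction l with
  | nil => intro acc h; exact h
  | cons p l ih =>
    intro acc h
    rw [List.foldl_cons]
    apply ih
    by_cases hc : (acc.1.contains p.1 && !acc.1.contains p.2) = true
    · rw [if_pos hc]; exact PySem.Set.nodup_add acc.1 p.2 h
    · rw [if_neg hc]; exact h

lemma pvRelax_subU (edges : List (Int × Int)) (U : List Int) :
    ∀ (l : List (Int × Int)) (acc : PySem.Set Int × Bool), (∀ p ∈ l, p.2 ∈ U) →
      (∀ x ∈ acc.1, x ∈ U) →
      ∀ x ∈ (l.foldl (fun acc p =>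
        if acc.1.contains p.1 && !acc.1.contains p.2 then (PySem.Set.add acc.1 p.2, true) else acc)
        acc).1, x ∈ U := by
  intro l
  induction l with
  | nil => intro acc _ hacc x hx; exact hacc x hx
  | cons p l ih =>
    intro acc hl hacc x hx
    rw [List.foldl_cons] at hx
    refine ih _ (fun q hq => hl q (List.mem_cons_of_mem _ hq)) ?_ x hx
    intro y hy
    by_cases hc : (acc.1.contains p.1 && !acc.1.contains p.2) = true
    · rw [if_pos hc] at hy
      rcases (PySem.Set.mem_add _ _ _).mp hy with hy | rfl
      · exact hacc y hy
      · exact hl p List.mem_cons_self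
    · rw [if_neg hc] at hy; exact hacc y hy

lemma pvRelax_sound (edges : List (Int × Int)) (u : Int) :
    ∀ (l : List (Int × Int)) (acc : PySem.Set Int × Bool), (∀ p ∈ l, p ∈ edges) →
      (∀ y ∈ acc.1, pvRTG edges u y) →
      ∀ x ∈ (l.foldl (fun acc p =>
        if acc.1.contains p.1 && !acc.1.contains p.2 then (PySem.Set.add acc.1 p.2, true) else acc)
        acc).1, pvRTG edges u x := by
  intro l
  induction l with
  | nil => intro acc _ hacc x hx; exact hacc x hx
  | cons p l ih =>
    intro acc hl hacc x hx
    rw [List.foldl_cons] at hx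
    refine ih _ (fun q hq => hl q (List.mem_cons_of_mem _ hq)) ?_ x hx
    intro y hy
    by_cases hc : (acc.1.contains p.1 && !acc.1.contains p.2) = true
    · rw [if_pos hc] at hy
      rcases (PySem.Set.mem_add _ _ _).mp hy with hy | rfl
      · exact hacc y hy
      · have ha : p.1 ∈ acc.1 := by
          have := (Bool.and_eq_true _ _).mp hc
          exact (PySem.Set.contains_iff _ _).mp this.1
        have hedge : (p.1, p.2) ∈ edges := by
          have := hl p List.mem_cons_self
          simpa using this
        exact Relation.ReflTransGen.tail (hacc p.1 ha) hedge
    · rw [if_neg hc] at hy; exact hacc y hy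

lemma pvRelax_flag_mono (edges : List (Int × Int)) :
    ∀ (l : List (Int × Int)) (acc : PySem.Set Int × Bool), acc.2 = true →
      (l.foldl (fun acc p =>
        if acc.1.contains p.1 && !acc.1.contains p.2 then (PySem.Set.add acc.1 p.2, true) else acc)
        acc).2 = true := by
  intro l
  induction l with
  | nil => intro acc h; exact h
  | cons p l ih =>
    intro acc h
    rw [List.foldl_cons]
    apply ih
    by_cases hc : (acc.1.contains p.1 && !acc.1.contains p.2) = true
    · rw [if_pos hc]
    · rw [if_neg hc]; exact h

lemma pvRelax_unchanged (edges : List (Int × Int)) :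
    ∀ (l : List (Int × Int)) (acc : PySem.Set Int × Bool),
      (l.foldl (fun acc p =>
        if acc.1.contains p.1 && !acc.1.contains p.2 then (PySem.Set.add acc.1 p.2, true) else acc)
        acc).2 = false →
      (l.foldl (fun acc p =>
        if acc.1.contains p.1 && !acc.1.contains p.2 then (PySem.Set.add acc.1 p.2, true) else acc)
        acc).1 = acc.1 := by
  intro l
  induction l with
  | nil => intro acc _; rfl
  | cons p l ih =>
    intro acc h
    rw [List.foldl_cons] at h ⊢
    by_cases hc : (acc.1.contains p.1 && !acc.1.contains p.2) = true
    · exfalso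
      rw [if_pos hc] at h
      have := pvRelax_flag_mono edges l (PySem.Set.add acc.1 p.2, true) rfl
      rw [h] at this
      exact Bool.false_ne_true this
    · rw [if_neg hc] at h ⊢
      exact ih acc h

lemma pvRelax_len_mono (edges : List (Int × Int)) :
    ∀ (l : List (Int × Int)) (acc : PySem.Set Int × Bool),
      acc.1.length ≤ (l.foldl (fun acc p =>
        if acc.1.contains p.1 && !acc.1.contains p.2 then (PySem.Set.add acc.1 p.2, true) else acc)
        acc).1.length := by
  intro l
  induction l with
  | nil => intro acc; exact le_rfl
  | cons p l ih =>
    intro acc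
    rw [List.foldl_cons]
    refine le_trans ?_ (ih _)
    by_cases hc : (acc.1.contains p.1 && !acc.1.contains p.2) = true
    · rw [if_pos hc]
      rw [PySem.Set.add_eq_ite]
      split_ifs with hm
      · exact le_rfl
      · simp
    · rw [if_neg hc]

lemma pvRelax_grow (edges : List (Int × Int)) :
    ∀ (l : List (Int × Int)) (acc : PySem.Set Int × Bool), acc.2 = false →
      (l.foldl (fun acc p =>
        if acc.1.contains p.1 && !acc.1.contains p.2 then (PySem.Set.add acc.1 p.2, true) else acc)
        acc).2 = true →
      acc.1.length + 1 ≤ (l.foldl (fun acc p =>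
        if acc.1.contains p.1 && !acc.1.contains p.2 then (PySem.Set.add acc.1 p.2, true) else acc)
        acc).1.length := by
  intro l
  induction l with
  | nil =>
    intro acc h1 h2
    rw [List.foldl_nil] at h2
    rw [h1] at h2
    exact absurd h2 Bool.false_ne_true
  | cons p l ih =>
    intro acc h1 h2
    rw [List.foldl_cons] at h2 ⊢
    by_cases hc : (acc.1.contains p.1 && !acc.1.contains p.2) = true
    · rw [if_pos hc] at h2 ⊢
      have hnm : p.2 ∉ acc.1 := by
        have := (Bool.and_eq_true _ _).mp hc
        intro hmem
        rw [(PySem.Set.contains_iff acc.1 p.2).mpr hmem] at this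
        simp at this
      have hadd : (PySem.Set.add acc.1 p.2).length = acc.1.length + 1 := by
        rw [PySem.Set.add_of_not_mem hnm, List.length_append, List.length_singleton]
      have := pvRelax_len_mono edges l (PySem.Set.add acc.1 p.2, true)
      simp only at this
      omega
    · rw [if_neg hc] at h2 ⊢
      exact ih acc h1 h2

lemma pvRelax_edge (edges : List (Int × Int)) :
    ∀ (l : List (Int × Int)) (acc : PySem.Set Int × Bool) (a b : Int), (a, b) ∈ l → a ∈ acc.1 →
      b ∈ (l.foldl (fun acc p =>
        if acc.1.contains p.1 && !acc.1.contains p.2 then (PySem.Set.add acc.1 p.2, true) else acc)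
        acc).1 := by
  intro l
  induction l with
  | nil => intro acc a b hab _; simp at hab
  | cons p l ih =>
    intro acc a b hab ha
    rw [List.foldl_cons]
    rcases List.mem_cons.mp hab with rfl | hab'
    · by_cases hc : (acc.1.contains a && !acc.1.contains b) = true
      · rw [if_pos hc]
        exact pvRelax_mono edges l _ b ((PySem.Set.mem_add _ _ _).mpr (Or.inr rfl))
      · have hb : b ∈ acc.1 := by
          rw [(PySem.Set.contains_iff acc.1 a).mpr ha] at hc
          simpa using hc
        exact pvRelax_mono edges l _ b (pvRelax_step_mono acc (a, b) b hb)
    · exact ih _ a b hab' (pvRelax_step_mono acc p a ha)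

lemma pvIterClose_spec (edges : List (Int × Int)) (u : Int) :
    ∀ (fuel : Nat) (S : PySem.Set Int), S.Nodup →
      (∀ x ∈ S, x ∈ u :: edges.map Prod.snd) → (∀ y ∈ S, pvRTG edges u y) → u ∈ S →
      edges.length + 1 ≤ fuel + S.length →
      (u ∈ pvIterClose edges fuel S ∧ (∀ x ∈ pvIterClose edges fuel S, pvRTG edges u x) ∧
        (∀ a b : Int, (a, b) ∈ edges → a ∈ pvIterClose edges fuel S → b ∈ pvIterClose edges fuel S)) := by
  intro fuel
  induction fuel with
  | zero =>
    intro S hnd hU hRTG huS hlen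
    have h0 : pvIterClose edges 0 S = S := rfl
    rw [h0]
    refine ⟨huS, hRTG, ?_⟩
    intro a b hab haS
    have hSU : S.toFinset ⊆ (u :: edges.map Prod.snd).toFinset := by
      intro x hx
      exact List.mem_toFinset.mpr (hU x (List.mem_toFinset.mp hx))
    have hcardS : S.toFinset.card = S.length := List.toFinset_card_of_nodup hnd
    have hcardU : (u :: edges.map Prod.snd).toFinset.card ≤ edges.length + 1 := by
      calc (u :: edges.map Prod.snd).toFinset.card ≤ (u :: edges.map Prod.snd).length :=
            List.toFinset_card_le _
        _ = edges.length + 1 := by rw [List.length_cons, List.length_map]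
    have heq : S.toFinset = (u :: edges.map Prod.snd).toFinset :=
      Finset.eq_of_subset_of_card_le hSU (by omega)
    have hbU : b ∈ u :: edges.map Prod.snd :=
      List.mem_cons_of_mem _ (List.mem_map.mpr ⟨(a, b), hab, rfl⟩)
    have hbS : b ∈ S.toFinset := by rw [heq]; exact List.mem_toFinset.mpr hbU
    exact List.mem_toFinset.mp hbS
  | succ fuel ih =>
    intro S hnd hU hRTG huS hlen
    have hstep : pvIterClose edges (fuel + 1) S =
        if (pvRelaxRound edges S).2 then pvIterClose edges fuel (pvRelaxRound edges S).1
        else (pvRelaxRound edges S).1 := rfl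
    rw [hstep]
    have hedges2 : ∀ p ∈ edges, p.2 ∈ u :: edges.map Prod.snd := fun p hp =>
      List.mem_cons_of_mem _ (List.mem_map.mpr ⟨p, hp, rfl⟩)
    by_cases hch : (pvRelaxRound edges S).2 = true
    · rw [if_pos hch]
      apply ih
      · exact pvRelax_nodup edges edges (S, false) hnd
      · exact pvRelax_subU edges (u :: edges.map Prod.snd) edges (S, false) hedges2 hU
      · exact pvRelax_sound edges u edges (S, false) (fun p hp => hp) hRTG
      · exact pvRelax_mono edges edges (S, false) u huS
      · have hgrow : S.length + 1 ≤ (pvRelaxRound edges S).1.length :=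
          pvRelax_grow edges edges (S, false) rfl hch
        omega
    · rw [if_neg hch]
      have hunch : (pvRelaxRound edges S).1 = S :=
        pvRelax_unchanged edges edges (S, false) (Bool.eq_false_iff.mpr hch)
      rw [hunch]
      refine ⟨huS, hRTG, ?_⟩
      intro a b hab haS
      have hb : b ∈ (pvRelaxRound edges S).1 := pvRelax_edge edges edges (S, false) a b hab haS
      rwa [hunch] at hb

lemma pv_reach_iff (edges : List (Int × Int)) (u v : Int) :
    v ∈ pvIterClose edges edges.length (PySem.Set.ofList [u]) ↔ pvRTG edges u v := by
  have hsingle : PySem.Set.ofList [u] = [u] :=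
    PySem.Set.ofList_eq_self_of_nodup _ (List.nodup_singleton u)
  rw [hsingle]
  have hspec := pvIterClose_spec edges u edges.length [u] (List.nodup_singleton u)
    (fun x hx => by rcases List.mem_singleton.mp hx with rfl; exact List.mem_cons_self)
    (fun y hy => by rcases List.mem_singleton.mp hy with rfl; exact Relation.ReflTransGen.refl)
    (List.mem_singleton.mpr rfl)
    (by simp)
  constructor
  · intro hv
    exact hspec.2.1 v hv
  · intro h
    induction h with
    | refl => exact hspec.1
    | tail hstep hedge ihr => exact hspec.2.2 _ _ hedge ihr

-- ---- assembly ----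
theorem pv_main (n : Int) (edges : List (Int × Int)) (nodes : List Int) :
    can_nodes_be_kahn_active_set n edges nodes = can_nodes_be_kahn_active_set_alt n edges nodes := by
  simp only [can_nodes_be_kahn_active_set, can_nodes_be_kahn_active_set_alt]
  apply congrArg
  rw [Bool.eq_iff_iff]
  have hA : (nodes.any fun u => nodes.any fun v =>
      decide (u > v) &&
        (pvTruthy (pvGetPath (pvBuildGraph edges) (edges.length + 1) u v []) ||
         pvTruthy (pvGetPath (pvBuildGraph edges) (edges.length + 1) v u []))) = true ↔
      ∃ u ∈ nodes, ∃ v ∈ nodes, v < u ∧ (pvRTG edges u v ∨ pvRTG edges v u) := by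
    simp only [List.any_eq_true, Bool.and_eq_true, Bool.or_eq_true, decide_eq_true_eq,
      pv_path_iff, gt_iff_lt]
  have hB : ((PySem.Set.ofList nodes).any fun u =>
      (PySem.Set.ofList nodes).any fun v =>
        !(v == u) && PySem.Set.contains (pvIterClose edges edges.length (PySem.Set.ofList [u])) v) =
        true ↔
      ∃ u ∈ nodes, ∃ v ∈ nodes, v ≠ u ∧ pvRTG edges u v := by
    simp only [List.any_eq_true, Bool.and_eq_true, Bool.not_eq_eq_eq_not, Bool.not_true,
      beq_eq_false_iff_ne, ne_eq, PySem.Set.contains_iff, pv_reach_iff, PySem.Set.mem_ofList]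
  rw [hA, hB]
  constructor
  · rintro ⟨u, hu, v, hv, hlt, hor⟩
    rcases hor with h | h
    · exact ⟨u, hu, v, hv, ne_of_lt hlt, h⟩
    · exact ⟨v, hv, u, hu, ne_of_gt hlt, h⟩
  · rintro ⟨u, hu, v, hv, hne, h⟩
    rcases lt_trichotomy v u with hlt | heq | hgt
    · exact ⟨u, hu, v, hv, hlt, Or.inl h⟩
    · exact absurd heq hne
    · exact ⟨v, hv, u, hu, hgt, Or.inr h⟩

-- ===== VERDICT (by name: the statement is the Claim_ definition above) =====
theorem can_nodes_be_kahn_active_set_spec : Claim_equal_can_nodes_be_kahn_active_set := by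
  intro n edges nodes _
  exact pv_main n edges nodes
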